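-- pv_equiv track=rewrite | github.com/skyrim4ev3r/leetcode_solutions | algorithms/2_medium/E/01807_evaluate_the_bracket_pairs_of_a_string/hashmap.py | evaluate
-- ===== SOURCE A (Python) =====
-- from typing import List
--
-- def evaluate(s: str, knowledge: List[List[str]]) -> str:
--     hashmap = {}
--     for k in knowledge:
--         hashmap[k[0]] = k[1]
--
--     res = []
--     i = 0
--     n = len(s)
--
--     while i < n:
--         if s[i] == '(':
--             temp_list = []
--             i += 1
--
--             while i < n and s[i] != ')':
--                 temp_list.append(s[i])
--                 i += 1
--
--             temp_str = "".join(temp_list)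
--             res.append(hashmap.get(temp_str, '?'))
--         else:
--             res.append(s[i])
--
--         i += 1
--
--     return "".join(res)
-- ===== SOURCE B (Python) =====
-- def evaluate(s, knowledge):
--     hashmap = {k[0]: k[1] for k in knowledge}
--     out = []
--     rest = s
--     while True:
--         pre, sep, rest = rest.partition('(')
--         out.append(pre)
--         if not sep:
--             break
--         key, sep2, rest = rest.partition(')')
--         out.append(hashmap.get(key, '?'))
--         if not sep2:
--             break
--     return ''.join(out)
-- ===== Notes on version B (the rewrite author's own statement) =====
-- stated objective: idiomatic
-- what changed: Replaced A's character-by-character index loop (manual i counter and inner while collecting the key) with a blockwise scan via str.partition that splits off whole segments at '(' and ')' with no index variable; the C-level partition/slice work gives a constant-factor speedup.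
import Mathlib
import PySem

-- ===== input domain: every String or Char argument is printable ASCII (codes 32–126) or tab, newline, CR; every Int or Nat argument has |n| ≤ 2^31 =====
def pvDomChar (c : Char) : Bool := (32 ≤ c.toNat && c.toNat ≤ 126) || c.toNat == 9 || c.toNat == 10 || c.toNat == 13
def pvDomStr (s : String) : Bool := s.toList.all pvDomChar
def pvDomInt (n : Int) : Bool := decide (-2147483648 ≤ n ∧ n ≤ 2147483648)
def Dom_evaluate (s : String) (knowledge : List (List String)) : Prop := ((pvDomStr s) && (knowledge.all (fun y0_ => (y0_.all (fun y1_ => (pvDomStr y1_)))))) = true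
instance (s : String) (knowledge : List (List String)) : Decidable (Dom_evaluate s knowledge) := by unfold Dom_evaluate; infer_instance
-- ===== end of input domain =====

-- B replaces A's manual index loop with a blockwise str.partition scan (objective: idiomatic).

-- ===== PORT A =====
-- hashmap = {}; for k in knowledge: hashmap[k[0]] = k[1]   (k[0]/k[1] raise IndexError
-- when len(k) < 2 — those inputs are excluded by Pre_evaluate; the .getD "" is unreachable there)
def pvMkMap (knowledge : List (List String)) : PySem.Dict String String :=
  knowledge.foldl
    (fun d k => d.insert ((PySem.List.pyGet? k 0).getD "") ((PySem.List.pyGet? k 1).getD "")) PySem.Dict.empty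

-- inner while of A: collect chars until ')' (the key), and also skip the ')' (A's final i += 1)
def pvSpanKeyA : List Char → List Char × List Char
  | [] => ([], [])
  | c :: rest =>
    if c = ')' then ([], rest)
    else (c :: (pvSpanKeyA rest).1, (pvSpanKeyA rest).2)

theorem pvSpanKeyA_len (cs : List Char) : (pvSpanKeyA cs).2.length ≤ cs.length := by
  induction cs with
  | nil => simp [pvSpanKeyA]
  | cons c rest ih =>
    simp only [pvSpanKeyA]
    split <;> simp <;> omega

-- A's outer while over the characters of s; "".join(res) is the concatenation of the pieces
def pvLoopA (hm : PySem.Dict String String) : List Char → List Char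
  | [] => []
  | c :: rest =>
    if c = '(' then
      (PySem.Dict.getD hm (String.mk (pvSpanKeyA rest).1) "?").toList ++ pvLoopA hm (pvSpanKeyA rest).2
    else
      c :: pvLoopA hm rest
termination_by cs => cs.length
decreasing_by
  · have := pvSpanKeyA_len rest; simp; omega
  · simp

def evaluate (s : String) (knowledge : List (List String)) : String :=
  String.mk (pvLoopA (pvMkMap knowledge) s.toList)

-- ===== PORT B =====
-- str.partition(c): (part before first c, whether c was found, part after it)
def pvPart (c : Char) : List Char → List Char × Bool × List Char
  | [] => ([], false, [])
  | x :: xs =>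
    if x = c then ([], true, xs)
    else (x :: (pvPart c xs).1, (pvPart c xs).2)

theorem pvPart_true_len (c : Char) (xs : List Char) (h : (pvPart c xs).2.1 = true) :
    (pvPart c xs).2.2.length < xs.length := by
  induction xs with
  | nil => simp [pvPart] at h
  | cons x rest ih =>
    by_cases hx : x = c
    · simp [pvPart, hx]
    · simp only [pvPart, if_neg hx] at h ⊢
      exact Nat.lt_succ_of_lt (ih h)

-- B's while True loop: split off the block before '(', then the key before ')', recurse on the rest
def pvLoopB (hm : PySem.Dict String String) (cs : List Char) : List Char :=
  let p1 := pvPart '(' cs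
  if h1 : p1.2.1 = true then
    let p2 := pvPart ')' p1.2.2
    p1.1 ++ (PySem.Dict.getD hm (String.mk p2.1) "?").toList ++
      (if h2 : p2.2.1 = true then pvLoopB hm p2.2.2 else [])
  else p1.1
termination_by cs.length
decreasing_by
  have ha := pvPart_true_len '(' cs h1
  have hb := pvPart_true_len ')' (pvPart '(' cs).2.2 h2
  omega

def evaluate_alt (s : String) (knowledge : List (List String)) : String :=
  String.mk (pvLoopB (pvMkMap knowledge) s.toList)

-- ===== PRECONDITION & SPEC =====
-- Pre_ excludes exactly the inputs where a knowledge entry has fewer than 2 elements: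
-- there Python A (and B) raise IndexError on k[0]/k[1].
def Pre_evaluate (s : String) (knowledge : List (List String)) : Prop :=
  ∀ k ∈ knowledge, 2 ≤ k.length
instance (s : String) (knowledge : List (List String)) : Decidable (Pre_evaluate s knowledge) := by
  unfold Pre_evaluate; infer_instance

def pvWitness_evaluate : String × List (List String) := ("(name)is(age)yrs", [["name", "bob"], ["age", "two"]])

def Spec_evaluate (s : String) (knowledge : List (List String)) (out : String) : Prop := out = evaluate_alt s knowledge
instance (s : String) (knowledge : List (List String)) (out : String) : Decidable (Spec_evaluate s knowledge out) := by unfold Spec_evaluate; infer_instance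

-- ===== CLAIM (what is proved, stated in full; the proofs are below) =====
def Claim_equal_evaluate : Prop := ∀ (s : String) (knowledge : List (List String)), Dom_evaluate s knowledge → Pre_evaluate s knowledge → Spec_evaluate s knowledge (evaluate s knowledge)

-- ===== LEMMAS AND PROOFS =====

-- pvSpanKeyA is pvPart ')' with the found-flag dropped (both return [] as the rest when ')' is absent)
theorem spanKeyA_eq_part (cs : List Char) :
    pvSpanKeyA cs = ((pvPart ')' cs).1, (pvPart ')' cs).2.2) := by
  induction cs with
  | nil => simp [pvSpanKeyA, pvPart]
  | cons c rest ih => simp only [pvSpanKeyA, pvPart]; split <;> simp_all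

theorem part_not_found (c : Char) (cs : List Char) (h : (pvPart c cs).2.1 = false) :
    (pvPart c cs).2.2 = [] := by
  induction cs with
  | nil => simp [pvPart]
  | cons x rest ih => simp only [pvPart] at h ⊢; split at h <;> simp_all

theorem loopA_eq_loopB (hm : PySem.Dict String String) (cs : List Char) :
    pvLoopA hm cs = pvLoopB hm cs := by
  generalize hn : cs.length = n
  induction n using Nat.strong_induction_on generalizing cs with
  | _ n ih =>
  cases cs with
  | nil => subst hn; simp [pvLoopA, pvLoopB, pvPart]
  | cons c rest =>
    by_cases hc : c = '('
    · subst hc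
      have hp1 : pvPart '(' ('(' :: rest) = ([], true, rest) := by simp [pvPart]
      rw [pvLoopA, if_pos rfl, spanKeyA_eq_part, pvLoopB, hp1]
      simp only [List.nil_append]
      by_cases h2 : (pvPart ')' rest).2.1 = true
      · rw [dif_pos h2]
        have hlt := pvPart_true_len ')' rest h2
        rw [ih (pvPart ')' rest).2.2.length (by simp at hn; omega) _ rfl]
        simp
      · rw [dif_neg h2, part_not_found ')' rest (by simpa using h2)]
        simp [pvLoopA]
    · have hp1 : pvPart '(' (c :: rest) =
          (c :: (pvPart '(' rest).1, (pvPart '(' rest).2.1, (pvPart '(' rest).2.2) := by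
        simp [pvPart, hc]
      have hrest : pvLoopA hm rest = pvLoopB hm rest :=
        ih rest.length (by simp at hn; omega) rest rfl
      rw [pvLoopA, if_neg hc, hrest]
      conv_rhs => rw [pvLoopB, hp1]
      rw [pvLoopB]
      by_cases h1 : (pvPart '(' rest).2.1 = true
      · simp [h1]
      · simp [h1]

-- ===== VERDICT (by name: the statement is the Claim_ definition above) =====
theorem evaluate_spec : Claim_equal_evaluate := by
  intro s knowledge _ _
  unfold Spec_evaluate evaluate evaluate_alt
  rw [loopA_eq_loopB]
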